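-- pv_equiv track=rewrite | github.com/skatzrskx55q/start | app.py | _split_filter_values
-- ===== SOURCE A (Python) =====
-- def _split_filter_values(value: str, split_newline: bool = True, split_pipe: bool = True) -> list[str]:
--     text = str(value).strip()
--     if not text:
--         return []
--     chunks = text.split("\n") if split_newline else [text]
--     result: list[str] = []
--     for chunk in chunks:
--         parts = chunk.split("|") if split_pipe else [chunk]
--         for part in parts:
--             part = part.strip()
--             if part:
--                 result.append(part)
--     return result
-- ===== SOURCE B (Python) =====
-- def _split_filter_values(value: str, split_newline: bool = True, split_pipe: bool = True) -> list[str]: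
--     seps = ("\n" if split_newline else "") + ("|" if split_pipe else "")
--     out: list[str] = []
--     buf: list[str] = []
--     for ch in str(value).strip():
--         if ch in seps:
--             tok = "".join(buf).strip()
--             if tok:
--                 out.append(tok)
--             buf = []
--         else:
--             buf.append(ch)
--     tok = "".join(buf).strip()
--     if tok:
--         out.append(tok)
--     return out
-- ===== Notes on version B (the rewrite author's own statement) =====
-- stated objective: alternative
-- what changed: Replaces the nested split('\n')-then-split('|') loops with a single left-to-right character scan that accumulates the current token and flushes it (stripped, if non-empty) at each enabled separator character.
import Mathlib
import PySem

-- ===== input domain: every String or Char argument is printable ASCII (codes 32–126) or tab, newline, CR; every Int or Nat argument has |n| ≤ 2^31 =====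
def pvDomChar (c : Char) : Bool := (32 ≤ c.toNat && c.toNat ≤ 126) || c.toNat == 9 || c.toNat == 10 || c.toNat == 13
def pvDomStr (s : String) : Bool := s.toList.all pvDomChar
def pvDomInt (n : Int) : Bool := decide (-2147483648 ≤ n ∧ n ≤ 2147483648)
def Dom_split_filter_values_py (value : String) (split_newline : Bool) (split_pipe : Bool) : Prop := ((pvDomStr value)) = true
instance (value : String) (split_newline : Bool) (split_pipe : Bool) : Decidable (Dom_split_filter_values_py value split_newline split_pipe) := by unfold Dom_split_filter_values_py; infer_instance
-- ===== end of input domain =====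

-- B replaces A's nested newline-then-pipe split loops with a single character-scan tokenizer (alternative decomposition, same cost).


-- ===== PORT A =====
-- literal transliteration of A: strip, early [] return, split by "\n" (flag), then by "|" (flag), strip each part, append non-empty
def split_filter_values_py (value : String) (split_newline : Bool) (split_pipe : Bool) : List String :=
  let text := PySem.Chars.strip value.toList
  if text = [] then []
  else
    let chunks := if split_newline then PySem.Chars.splitOn text ['\n'] else [text]
    chunks.foldl (fun result chunk =>
        let parts := if split_pipe then PySem.Chars.splitOn chunk ['|'] else [chunk]
        parts.foldl (fun result part =>
          let part := PySem.Chars.strip part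
          if part = [] then result else result ++ [String.ofList part]) result)
      ([] : List String)

-- ===== PORT B =====
-- literal transliteration of B (Source B): build the enabled-separator set, one fold over the stripped text
-- keeping (out, buf); flush the stripped buffer at each separator and at the end
def split_filter_values_py_alt (value : String) (split_newline : Bool) (split_pipe : Bool) : List String :=
  let seps : List Char := (if split_newline then ['\n'] else []) ++ (if split_pipe then ['|'] else [])
  let st := (PySem.Chars.strip value.toList).foldl
    (fun (st : List String × List Char) (ch : Char) =>
      if seps.contains ch then
        let tok := PySem.Chars.strip st.2
        (if tok = [] then st.1 else st.1 ++ [String.ofList tok], [])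
      else (st.1, st.2 ++ [ch]))
    (([] : List String), ([] : List Char))
  let tok := PySem.Chars.strip st.2
  if tok = [] then st.1 else st.1 ++ [String.ofList tok]

-- ===== PRECONDITION & SPEC =====
def Spec_split_filter_values_py (value : String) (split_newline : Bool) (split_pipe : Bool) (out : List String) : Prop := out = split_filter_values_py_alt value split_newline split_pipe
instance (value : String) (split_newline : Bool) (split_pipe : Bool) (out : List String) : Decidable (Spec_split_filter_values_py value split_newline split_pipe out) := by unfold Spec_split_filter_values_py; infer_instance

-- ===== CLAIM (what is proved, stated in full; the proofs are below) =====
def Claim_equal_split_filter_values_py : Prop := ∀ (value : String) (split_newline : Bool) (split_pipe : Bool), Dom_split_filter_values_py value split_newline split_pipe → Spec_split_filter_values_py value split_newline split_pipe (split_filter_values_py value split_newline split_pipe)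

-- ===== LEMMAS AND PROOFS =====

-- split a char list at separator characters (head token, remaining tokens)
def splitP (p : Char → Bool) : List Char → List Char × List (List Char)
  | [] => ([], [])
  | c :: cs =>
    let r := splitP p cs
    if p c then ([], r.1 :: r.2) else (c :: r.1, r.2)

def tokensP (p : Char → Bool) (cs : List Char) : List (List Char) :=
  (splitP p cs).1 :: (splitP p cs).2

-- strip every token, drop empties, pack into strings
def emitTok (l : List (List Char)) : List String :=
  ((l.map PySem.Chars.strip).filter (· ≠ [])).map String.ofList

theorem emitTok_append (l₁ l₂ : List (List Char)) :
    emitTok (l₁ ++ l₂) = emitTok l₁ ++ emitTok l₂ := by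
  simp [emitTok]

theorem emitTok_cons (t : List Char) (l : List (List Char)) :
    emitTok (t :: l) =
      (if PySem.Chars.strip t = [] then [] else [String.ofList (PySem.Chars.strip t)]) ++ emitTok l := by
  by_cases h : PySem.Chars.strip t = [] <;> simp [emitTok, h]

theorem tokensP_cons_pos (p : Char → Bool) (c : Char) (cs : List Char) (h : p c = true) :
    tokensP p (c :: cs) = [] :: tokensP p cs := by
  simp [tokensP, splitP, h]

theorem tokensP_cons_neg (p : Char → Bool) (c : Char) (cs : List Char) (h : p c = false)
    (t : List Char) (ts : List (List Char)) (he : tokensP p cs = t :: ts) :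
    tokensP p (c :: cs) = (c :: t) :: ts := by
  unfold tokensP at he ⊢
  have h1 : (splitP p cs).1 = t := (List.cons.injEq .. ▸ he).1
  have h2 : (splitP p cs).2 = ts := (List.cons.injEq .. ▸ he).2
  simp [splitP, h, h1, h2]

theorem tokensP_dest (p : Char → Bool) (cs : List Char) :
    ∃ t ts, tokensP p cs = t :: ts := ⟨_, _, rfl⟩

theorem tokensP_false (cs : List Char) : tokensP (fun _ => false) cs = [cs] := by
  induction cs with
  | nil => rfl
  | cons c cs ih => rw [tokensP_cons_neg _ c cs rfl cs [] ih]

-- Python's single-char split is splitP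
theorem splitOn_go_eq (d : Char) (fuel : Nat) (l cur : List Char) (acc : List (List Char))
    (h : l.length ≤ fuel) :
    PySem.Chars.splitOn.go [d] fuel l cur acc =
      acc.reverse ++ (cur.reverse ++ (splitP (· == d) l).1) :: (splitP (· == d) l).2 := by
  induction fuel generalizing l cur acc with
  | zero =>
    have hl : l = [] := List.length_eq_zero_iff.mp (Nat.le_zero.mp h)
    subst hl
    simp [PySem.Chars.splitOn.go, splitP]
  | succ fuel ih =>
    cases l with
    | nil => simp [PySem.Chars.splitOn.go, splitP]
    | cons c rest =>
      have hr : rest.length ≤ fuel := by simpa using h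
      by_cases hc : c = d
      · subst hc
        rw [PySem.Chars.splitOn.go]
        simp only [List.isPrefixOf, Bool.and_true, beq_self_eq_true, if_pos,
          List.length_cons, List.length_nil, List.drop_succ_cons, List.drop_zero,
          List.isPrefixOf_nil_left]
        rw [ih rest [] ((cur.reverse) :: acc) hr]
        simp [splitP]
      · rw [PySem.Chars.splitOn.go]
        have hpre : List.isPrefixOf [d] (c :: rest) = false := by
          simp [List.isPrefixOf]
          exact fun h' => (hc h'.symm).elim
        simp only [hpre, Bool.false_eq_true, if_neg, not_false_eq_true]
        rw [ih rest (c :: cur) acc hr]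
        simp [splitP, hc]

theorem splitOn_eq_tokensP (d : Char) (l : List Char) :
    PySem.Chars.splitOn l [d] = tokensP (· == d) l := by
  unfold PySem.Chars.splitOn
  rw [splitOn_go_eq d (l.length + 1) l [] [] (Nat.le_succ _)]
  simp [tokensP]

-- nested tokenization is tokenization by the union predicate
theorem tokensP_flatMap (p q : Char → Bool) (cs : List Char) :
    (tokensP p cs).flatMap (tokensP q) = tokensP (fun c => p c || q c) cs := by
  induction cs with
  | nil => simp [tokensP, splitP]
  | cons c cs ih =>
    obtain ⟨t, ts, hp⟩ := tokensP_dest p cs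
    cases hpc : p c with
    | true =>
      rw [tokensP_cons_pos p c cs hpc, tokensP_cons_pos _ c cs (by simp [hpc])]
      simp only [List.flatMap_cons, ih]
      rfl
    | false =>
      rw [tokensP_cons_neg p c cs hpc t ts hp]
      rw [hp] at ih
      cases hqc : q c with
      | true =>
        rw [tokensP_cons_pos _ c cs (by simp [hpc, hqc])]
        simp only [List.flatMap_cons, tokensP_cons_pos q c t hqc, List.cons_append]
        rw [← ih]
        simp [List.flatMap_cons]
      | false =>
        obtain ⟨u, us, hq⟩ := tokensP_dest q t
        rw [tokensP_cons_neg _ c cs (by simp [hpc, hqc]) (u) (us ++ ts.flatMap (tokensP q))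
          (by rw [← ih]; simp [List.flatMap_cons, hq])]
        simp [List.flatMap_cons, tokensP_cons_neg q c t hqc u us hq]

-- A's inner append loop emits the stripped non-empty tokens
theorem foldl_emit (l : List (List Char)) (acc : List String) :
    l.foldl (fun result part =>
        let part := PySem.Chars.strip part
        if part = [] then result else result ++ [String.ofList part]) acc
      = acc ++ emitTok l := by
  induction l generalizing acc with
  | nil => simp [emitTok]
  | cons t l ih =>
    simp only [List.foldl_cons, ih, emitTok_cons]
    by_cases h : PySem.Chars.strip t = [] <;> simp [h]

-- B's scan with state (out, buf) emits the tokens of buf ++ rest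
theorem foldl_scan (p : Char → Bool) (cs : List Char) (out : List String) (buf : List Char) :
    (let st := cs.foldl
        (fun (st : List String × List Char) (ch : Char) =>
          if p ch then
            let tok := PySem.Chars.strip st.2
            (if tok = [] then st.1 else st.1 ++ [String.ofList tok], [])
          else (st.1, st.2 ++ [ch]))
        (out, buf)
      let tok := PySem.Chars.strip st.2
      if tok = [] then st.1 else st.1 ++ [String.ofList tok])
    = out ++ emitTok ((buf ++ (splitP p cs).1) :: (splitP p cs).2) := by
  induction cs generalizing out buf with
  | nil => simp only [List.foldl_nil, splitP, List.append_nil, emitTok_cons, emitTok]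
           by_cases h : PySem.Chars.strip buf = [] <;> simp [h]
  | cons c cs ih =>
    by_cases hc : p c
    · simp only [List.foldl_cons, hc, if_pos, splitP]
      rw [ih]
      simp only [List.nil_append, emitTok_cons]
      by_cases h : PySem.Chars.strip buf = [] <;> simp [h, emitTok_cons]
    · simp only [List.foldl_cons, hc, Bool.false_eq_true, if_neg, not_false_eq_true, splitP]
      rw [ih]
      simp [List.append_assoc]

-- the chunk/part structure of A equals tokensP of the union predicate
theorem chunks_flatMap_eq (sn sp : Bool) (text : List Char) :
    ((if sn then PySem.Chars.splitOn text ['\n'] else [text]).flatMap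
        (fun chunk => if sp then PySem.Chars.splitOn chunk ['|'] else [chunk]))
      = tokensP (fun c => (sn && (c == '\n')) || (sp && (c == '|'))) text := by
  cases sn <;> cases sp <;>
    simp only [if_pos, if_neg, Bool.false_eq_true, not_false_eq_true,
      Bool.false_and, Bool.true_and, Bool.false_or, Bool.or_false, splitOn_eq_tokensP] <;>
    first
      | exact tokensP_flatMap (· == '\n') (· == '|') text
      | simp [tokensP_false]
      | (have h := tokensP_flatMap (fun _ => false) (· == '|') text
         simp only [Bool.false_or] at h
         rw [← h, tokensP_false]; simp)

-- A as emitTok over the union tokenization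
theorem portA_eq (value : String) (sn sp : Bool) :
    split_filter_values_py value sn sp =
      (let text := PySem.Chars.strip value.toList
       if text = [] then []
       else emitTok (tokensP (fun c => (sn && (c == '\n')) || (sp && (c == '|'))) text)) := by
  unfold split_filter_values_py
  simp only []
  by_cases h : PySem.Chars.strip value.toList = []
  · simp [h]
  · simp only [h, if_neg, not_false_eq_true]
    rw [← chunks_flatMap_eq sn sp]
    generalize (if sn then PySem.Chars.splitOn (PySem.Chars.strip value.toList) ['\n']
        else [PySem.Chars.strip value.toList]) = chunks
    induction chunks using List.reverseRecOn with
    | nil => simp [emitTok]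
    | append_singleton chunks chunk ih =>
      simp only [List.foldl_append, List.foldl_cons, List.foldl_nil, ih,
        List.flatMap_append, List.flatMap_cons, List.flatMap_nil, List.append_nil,
        emitTok_append]
      rw [foldl_emit]

-- membership in the built separator list is the union predicate
theorem seps_contains (sn sp : Bool) (c : Char) :
    ((if sn then ['\n'] else []) ++ (if sp then ['|'] else []) : List Char).contains c
      = ((sn && (c == '\n')) || (sp && (c == '|'))) := by
  cases sn <;> cases sp <;> simp <;>
    cases h1 : (c == '\n') <;> cases h2 : (c == '|') <;> simp_all

theorem portB_eq (value : String) (sn sp : Bool) :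
    split_filter_values_py_alt value sn sp =
      emitTok (tokensP (fun c => (sn && (c == '\n')) || (sp && (c == '|')))
        (PySem.Chars.strip value.toList)) := by
  unfold split_filter_values_py_alt
  simp only []
  have hp := foldl_scan (fun c => (sn && (c == '\n')) || (sp && (c == '|')))
    (PySem.Chars.strip value.toList) [] []
  simp only [List.nil_append] at hp ⊢
  rw [show (fun (st : List String × List Char) (ch : Char) =>
      if ((if sn then ['\n'] else []) ++ (if sp then ['|'] else []) : List Char).contains ch then
        let tok := PySem.Chars.strip st.2
        (if tok = [] then st.1 else st.1 ++ [String.ofList tok], [])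
      else (st.1, st.2 ++ [ch]))
    = (fun (st : List String × List Char) (ch : Char) =>
      if ((sn && (ch == '\n')) || (sp && (ch == '|'))) then
        let tok := PySem.Chars.strip st.2
        (if tok = [] then st.1 else st.1 ++ [String.ofList tok], [])
      else (st.1, st.2 ++ [ch])) from funext fun st => funext fun ch => by rw [seps_contains]]
  rw [hp]
  simp [tokensP]

-- empty head token case: emitTok of tokensP with empty first token when text = []
theorem emitTok_tokensP_nil (p : Char → Bool) :
    emitTok (tokensP p []) = [] := by
  simp [tokensP, splitP, emitTok, PySem.Chars.strip, PySem.Chars.lstrip, PySem.Chars.rstrip]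

-- ===== VERDICT (by name: the statement is the Claim_ definition above) =====
theorem split_filter_values_py_spec : Claim_equal_split_filter_values_py := by
  intro value sn sp _
  unfold Spec_split_filter_values_py
  rw [portA_eq, portB_eq]
  by_cases h : PySem.Chars.strip value.toList = []
  · simp [h, emitTok_tokensP_nil]
  · simp [h]
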